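-- pv_equiv track=rewrite | github.com/mihai-costin/myProjects | Working Days in a Month.py | countWork
-- ===== SOURCE A (Python) =====
-- def countWork(day, days):
--     count = 0
--
--     i = 0
--     while i < days:
--         temp = (day+i) % 7
--
--         # is a work day
--         if(temp == 0 or temp == 1 or temp == 2 or temp == 3 or temp == 6):
--             count = count + 1
--
--         i = i + 1
--
--     return count
-- ===== SOURCE B (Python) =====
-- def countWork(day, days):
--     if days <= 0:
--         return 0
--     full, rem = divmod(days, 7)
--     extra = 0
--     for r in range(rem):
--         if (day + r) % 7 in (0, 1, 2, 3, 6):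
--             extra = extra + 1
--     return full * 5 + extra
-- ===== Notes on version B (the rewrite author's own statement) =====
-- stated objective: faster
-- what changed: Replaces the O(days) day-by-day loop with a closed form: each full week contributes 5 work days ((days//7)*5), and only the days%7 leftover residues are checked individually.
import Mathlib
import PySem

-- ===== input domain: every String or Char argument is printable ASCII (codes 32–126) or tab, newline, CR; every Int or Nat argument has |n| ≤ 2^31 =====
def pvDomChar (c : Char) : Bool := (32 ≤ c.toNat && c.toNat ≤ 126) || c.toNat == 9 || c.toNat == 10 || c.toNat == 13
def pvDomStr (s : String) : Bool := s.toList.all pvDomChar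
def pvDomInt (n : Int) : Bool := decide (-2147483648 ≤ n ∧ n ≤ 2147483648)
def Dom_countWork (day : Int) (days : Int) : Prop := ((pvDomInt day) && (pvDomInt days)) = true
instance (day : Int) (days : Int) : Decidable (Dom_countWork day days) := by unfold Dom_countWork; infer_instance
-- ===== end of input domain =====

-- B replaces A's O(days) day-by-day loop with a closed form: (days//7)*5 plus a check of the days%7 leftover residues.

-- ===== PORT A =====
-- the while loop of A; fuel = number of remaining iterations (days - i), state (i, count)
def countWorkLoop (day : Int) : Nat → Int → Int → Int
  | 0, _, count => count
  | n + 1, i, count =>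
    let temp := PySem.Int.mod (day + i) 7
    countWorkLoop day n (i + 1)
      (if temp = 0 ∨ temp = 1 ∨ temp = 2 ∨ temp = 3 ∨ temp = 6 then count + 1 else count)

def countWork (day : Int) (days : Int) : Int :=
  countWorkLoop day days.toNat 0 0

-- ===== PORT B =====
def countWork_alt (day : Int) (days : Int) : Int :=
  if days ≤ 0 then 0
  else
    let full := PySem.Int.floordiv days 7
    let rem := PySem.Int.mod days 7
    let extra := (PySem.List.pyRange 0 rem 1).foldl
      (fun extra r =>
        if PySem.Int.mod (day + r) 7 = 0 ∨ PySem.Int.mod (day + r) 7 = 1 ∨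
           PySem.Int.mod (day + r) 7 = 2 ∨ PySem.Int.mod (day + r) 7 = 3 ∨
           PySem.Int.mod (day + r) 7 = 6 then extra + 1 else extra) 0
    full * 5 + extra

-- ===== PRECONDITION & SPEC =====
def Spec_countWork (day : Int) (days : Int) (out : Int) : Prop := out = countWork_alt day days
instance (day : Int) (days : Int) (out : Int) : Decidable (Spec_countWork day days out) := by unfold Spec_countWork; infer_instance

-- ===== CLAIM (what is proved, stated in full; the proofs are below) =====
def Claim_equal_countWork : Prop := ∀ (day : Int) (days : Int), Dom_countWork day days → Spec_countWork day days (countWork day days)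

-- ===== LEMMAS AND PROOFS =====

-- 0/1 indicator of a work day for start residue m
def wk (m : Int) : Int :=
  if m % 7 = 0 ∨ m % 7 = 1 ∨ m % 7 = 2 ∨ m % 7 = 3 ∨ m % 7 = 6 then 1 else 0

-- number of work days among m, m+1, …, m+n-1
def U (m : Int) : Nat → Int
  | 0 => 0
  | n + 1 => wk m + U (m + 1) n

theorem pymod7 (a : Int) : PySem.Int.mod a 7 = a % 7 :=
  PySem.Int.mod_eq_emod_of_pos (by norm_num)

theorem loopA_eq (day : Int) : ∀ (n : Nat) (i c : Int),
    countWorkLoop day n i c = c + U (day + i) n := by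
  intro n
  induction n with
  | zero => intro i c; simp [countWorkLoop, U]
  | succ n ih =>
    intro i c
    simp only [countWorkLoop, U, pymod7]
    rw [ih]
    have h1 : day + (i + 1) = day + i + 1 := by ring
    rw [h1]
    unfold wk
    split_ifs with h <;> ring

theorem U_succ_back (m : Int) : ∀ n : Nat, U m (n + 1) = U m n + wk (m + n) := by
  intro n
  induction n generalizing m with
  | zero => simp [U]
  | succ n ih =>
    show wk m + U (m + 1) (n + 1) = wk m + U (m + 1) n + wk (m + (n + 1))
    rw [ih]
    have : m + 1 + (n : Int) = m + (n + 1) := by ring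
    rw [this]; ring

theorem wk_congr {a b : Int} (h : a % 7 = b % 7) : wk a = wk b := by
  unfold wk; rw [h]

theorem U_split (m : Int) (a : Nat) : ∀ b : Nat, U m (a + b) = U m a + U (m + a) b := by
  intro b
  induction b with
  | zero => simp [U]
  | succ b ih =>
    have h1 : a + (b + 1) = (a + b) + 1 := rfl
    rw [h1, U_succ_back, ih, U_succ_back]
    push_cast
    have h2 : m + ((a : Int) + b) = m + a + b := by ring
    rw [h2]
    ring

theorem seven_sum (m : Int) :
    wk m + wk (m + 1) + wk (m + 2) + wk (m + 3) + wk (m + 4) + wk (m + 5) + wk (m + 6) = 5 := by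
  have h0 : 0 ≤ m % 7 := Int.emod_nonneg m (by norm_num)
  have h1 : m % 7 < 7 := Int.emod_lt_of_pos m (by norm_num)
  have e : ∀ j : Int, (m + j) % 7 = (m % 7 + j) % 7 := by
    intro j; omega
  rw [wk_congr (e 1), wk_congr (e 2), wk_congr (e 3), wk_congr (e 4),
      wk_congr (e 5), wk_congr (e 6), wk_congr (a := m) (b := m % 7) (by omega)]
  interval_cases h : m % 7 <;> decide

theorem U_seven (m : Int) : U m 7 = 5 := by
  have e0 := U_succ_back m 0
  have e1 := U_succ_back m 1
  have e2 := U_succ_back m 2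
  have e3 := U_succ_back m 3
  have e4 := U_succ_back m 4
  have e5 := U_succ_back m 5
  have e6 := U_succ_back m 6
  have z : U m 0 = 0 := rfl
  have s := seven_sum m
  norm_num at e0 e1 e2 e3 e4 e5 e6
  linarith

theorem U_block (m : Int) (n : Nat) : U m (n + 7) = U m n + 5 := by
  rw [U_split, U_seven (m + n)]

-- closed form for U
theorem U_closed (day : Int) (n : Nat) : U day n = (↑(n / 7) : Int) * 5 + U day (n % 7) := by
  induction n using Nat.strong_induction_on with
  | _ n ih =>
    by_cases h : n < 7
    · have : n / 7 = 0 := Nat.div_eq_of_lt h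
      have h2 : n % 7 = n := Nat.mod_eq_of_lt h
      rw [this, h2]; simp
    · obtain ⟨k, rfl⟩ : ∃ k, n = k + 7 := ⟨n - 7, by omega⟩
      rw [U_block, ih k (by omega)]
      have d1 : (k + 7) / 7 = k / 7 + 1 := by omega
      have d2 : (k + 7) % 7 = k % 7 := by omega
      rw [d1, d2]; push_cast; ring

-- B's fold over pyRange 0 n equals U day n
theorem fold_eq (day : Int) (n : Nat) :
    (PySem.List.pyRange 0 (n : Int) 1).foldl
      (fun extra r =>
        if PySem.Int.mod (day + r) 7 = 0 ∨ PySem.Int.mod (day + r) 7 = 1 ∨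
           PySem.Int.mod (day + r) 7 = 2 ∨ PySem.Int.mod (day + r) 7 = 3 ∨
           PySem.Int.mod (day + r) 7 = 6 then extra + 1 else extra) 0 = U day n := by
  induction n with
  | zero => simp [PySem.List.pyRange_one_eq_nil, U]
  | succ n ih =>
    have h : PySem.List.pyRange 0 ((n : Int) + 1) 1 =
        PySem.List.pyRange 0 (n : Int) 1 ++ [(n : Int)] :=
      PySem.List.pyRange_one_succ_right (by positivity)
    push_cast
    rw [h, List.foldl_append, ih, U_succ_back]
    simp only [List.foldl, pymod7]
    unfold wk
    split_ifs with h' <;> simp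

-- ===== VERDICT (by name: the statement is the Claim_ definition above) =====
theorem countWork_spec : Claim_equal_countWork := by
  intro day days _
  unfold Spec_countWork countWork countWork_alt
  rw [loopA_eq, add_zero, zero_add]
  by_cases h : days ≤ 0
  · have : days.toNat = 0 := Int.toNat_of_nonpos h
    rw [this]; simp [U, h]
  · simp only [if_neg h]
    obtain ⟨n, rfl⟩ : ∃ n : Nat, days = (n : Int) := ⟨days.toNat, by omega⟩
    have hf : PySem.Int.floordiv (n : Int) 7 = ((n / 7 : Nat) : Int) := by
      exact_mod_cast PySem.Int.floordiv_natCast n 7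
    have hm : PySem.Int.mod (n : Int) 7 = ((n % 7 : Nat) : Int) := by
      exact_mod_cast PySem.Int.mod_natCast n 7
    rw [Int.toNat_natCast, hf, hm, fold_eq day (n % 7), U_closed]
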